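-- pv_equiv track=rewrite | github.com/dstamp1NYCDOE/data-specialist-flask | app/scripts/testing/regents/schedule_students.py | calculate_class_size
-- ===== SOURCE A (Python) =====
-- def calculate_class_size(total_students, max_class_size=33, ideal_class_size=33):
--     """
--     Calculate the optimal class size given total number of students.
--
--     Rules:
--     - Ideal class size is ideal_class_size
--     - Maximum allowed class size is 34, but only if remainder equals number of sections at ideal_class_size
--     - If remainder > number of sections at ideal_class_size, add more sections to balance
--     - Minimize number of sections while avoiding very small last sections
--
--     Returns the maximum class size that will be used.
--     """
--     if total_students <= max_class_size:
--         return ideal_class_size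
--
--     # Start with sections of ideal_class_size and see what remainder we get
--     sections_at_ideal = total_students // ideal_class_size
--     remainder = total_students % ideal_class_size
--
--     # If remainder == 0, all sections are ideal_class_size
--     if remainder == 0:
--         return ideal_class_size
--
--     # If remainder equals the number of sections, we can go to max_class_size
--     if remainder == sections_at_ideal:
--         return max_class_size
--
--     # If remainder < number of sections, we can distribute evenly at ideal_class_size and max_class_size
--     if remainder < sections_at_ideal:
--         return max_class_size
--
--     # If remainder > number of sections, we need more sections to balance
--     # Find the minimum number of sections where all are reasonably balanced
--     min_sections = sections_at_ideal + 1
--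
--     while True:
--         base_size = total_students // min_sections
--         section_remainder = total_students % min_sections
--
--         # If base_size > max_class_size, we need even more sections
--         if base_size > max_class_size:
--             min_sections += 1
--             continue
--
--         # Check if this gives us a reasonable distribution
--         if section_remainder == 0:
--             return base_size
--         else:
--             return base_size + 1
-- ===== SOURCE B (Python) =====
-- def calculate_class_size(total_students, max_class_size=33, ideal_class_size=33):
--     if total_students <= max_class_size:
--         return ideal_class_size
--     sections_at_ideal, remainder = divmod(total_students, ideal_class_size)
--     if remainder == 0:
--         return ideal_class_size
--     if remainder <= sections_at_ideal:
--         return max_class_size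
--     # smallest section count >= sections_at_ideal + 1 whose base size fits max_class_size
--     min_sections = max(sections_at_ideal + 1,
--                        total_students // (max_class_size + 1) + 1)
--     return -(-total_students // min_sections)
-- ===== Notes on version B (the rewrite author's own statement) =====
-- stated objective: simpler
-- what changed: The final balancing case's while-True search for the minimum section count is replaced by a closed form min_sections = max(sections_at_ideal+1, total_students//(max_class_size+1)+1) followed by one ceiling division, and the two remainder<=sections branches are merged.
-- outside the precondition, e.g. on calculate_class_size(10, 5, -3): A returns -3, B returns 5; on calculate_class_size(10, -2, 33): A does not finish within the time limit, B returns 10; on calculate_class_size(50, 33, 0): A raises ZeroDivisionError, B raises ZeroDivisionError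
import Mathlib
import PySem

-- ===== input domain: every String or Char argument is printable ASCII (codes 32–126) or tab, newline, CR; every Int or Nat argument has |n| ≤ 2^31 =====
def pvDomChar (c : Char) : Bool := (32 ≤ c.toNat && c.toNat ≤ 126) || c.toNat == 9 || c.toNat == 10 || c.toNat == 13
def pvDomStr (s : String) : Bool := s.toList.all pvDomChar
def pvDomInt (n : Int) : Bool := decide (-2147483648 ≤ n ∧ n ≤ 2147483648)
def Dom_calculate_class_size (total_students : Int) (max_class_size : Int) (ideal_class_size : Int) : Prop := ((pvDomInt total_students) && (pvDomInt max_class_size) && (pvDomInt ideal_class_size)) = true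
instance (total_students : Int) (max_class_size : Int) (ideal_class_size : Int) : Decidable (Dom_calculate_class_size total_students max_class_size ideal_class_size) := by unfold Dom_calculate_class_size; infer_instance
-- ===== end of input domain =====

-- B replaces A's while-loop search in the final balancing case by a closed-form
-- minimum section count and one ceiling division (objective: simpler).

-- ===== PORT A =====
-- fuel-bounded transliteration of A's `while True` loop; fuel is only a totality
-- guard, never reached under Pre_ (proved below).
def pvLoopA (total_students : Int) (max_class_size : Int) : Nat → Int → Int
  | 0, _ => 0
  | fuel + 1, min_sections =>
      let base_size := PySem.Int.floordiv total_students min_sections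
      let section_remainder := PySem.Int.mod total_students min_sections
      if base_size > max_class_size then
        pvLoopA total_students max_class_size fuel (min_sections + 1)
      else if section_remainder = 0 then base_size
      else base_size + 1

def calculate_class_size (total_students : Int) (max_class_size : Int) (ideal_class_size : Int) : Int :=
  if total_students ≤ max_class_size then ideal_class_size
  else
    let sections_at_ideal := PySem.Int.floordiv total_students ideal_class_size
    let remainder := PySem.Int.mod total_students ideal_class_size
    if remainder = 0 then ideal_class_size
    else if remainder = sections_at_ideal then max_class_size
    else if remainder < sections_at_ideal then max_class_size
    else pvLoopA total_students max_class_size (total_students.toNat + 2) (sections_at_ideal + 1)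

-- ===== PORT B =====
def calculate_class_size_alt (total_students : Int) (max_class_size : Int) (ideal_class_size : Int) : Int :=
  if total_students ≤ max_class_size then ideal_class_size
  else
    let sections_at_ideal := PySem.Int.floordiv total_students ideal_class_size
    let remainder := PySem.Int.mod total_students ideal_class_size
    if remainder = 0 then ideal_class_size
    else if remainder ≤ sections_at_ideal then max_class_size
    else
      let min_sections := max (sections_at_ideal + 1)
        (PySem.Int.floordiv total_students (max_class_size + 1) + 1);
      -(PySem.Int.floordiv (-total_students) min_sections)

-- ===== PRECONDITION & SPEC =====
-- Pre_ admits every input on which A returns before dividing (total ≤ max) and otherwise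
-- the natural domain of positive ideal size and nonnegative max size: there ideal = 0
-- raises ZeroDivisionError, A's while loop diverges for some negative max_class_size, and
-- A's values for negative ideal_class_size are accidents of floor division outside the
-- function's purpose (class sizes are nonnegative).
def Pre_calculate_class_size (total_students : Int) (max_class_size : Int) (ideal_class_size : Int) : Prop :=
  total_students ≤ max_class_size ∨ (0 < ideal_class_size ∧ 0 ≤ max_class_size)
instance (total_students : Int) (max_class_size : Int) (ideal_class_size : Int) : Decidable (Pre_calculate_class_size total_students max_class_size ideal_class_size) := by unfold Pre_calculate_class_size; infer_instance

def pvWitness_calculate_class_size : Int × Int × Int := (100, 33, 33)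

def Spec_calculate_class_size (total_students : Int) (max_class_size : Int) (ideal_class_size : Int) (out : Int) : Prop := out = calculate_class_size_alt total_students max_class_size ideal_class_size
instance (total_students : Int) (max_class_size : Int) (ideal_class_size : Int) (out : Int) : Decidable (Spec_calculate_class_size total_students max_class_size ideal_class_size out) := by unfold Spec_calculate_class_size; infer_instance

-- ===== CLAIM (what is proved, stated in full; the proofs are below) =====
def Claim_equal_calculate_class_size : Prop := ∀ (total_students : Int) (max_class_size : Int) (ideal_class_size : Int), Dom_calculate_class_size total_students max_class_size ideal_class_size → Pre_calculate_class_size total_students max_class_size ideal_class_size → Spec_calculate_class_size total_students max_class_size ideal_class_size (calculate_class_size total_students max_class_size ideal_class_size)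

-- ===== LEMMAS AND PROOFS =====

-- exit test of A's loop, in closed form: base fits max  iff  n has reached the target
theorem pvExit_iff (t m n : Int) (hm : 0 ≤ m) (hn : 1 ≤ n) :
    ¬ (PySem.Int.floordiv t n > m) ↔ PySem.Int.floordiv t (m + 1) + 1 ≤ n := by
  have hA : PySem.Int.floordiv t n < m + 1 ↔ t < (m + 1) * n :=
    PySem.Int.floordiv_lt_iff_lt_mul (by omega)
  have hB : PySem.Int.floordiv t (m + 1) < n ↔ t < n * (m + 1) :=
    PySem.Int.floordiv_lt_iff_lt_mul (by omega)
  rw [mul_comm] at hA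
  omega

-- A's loop computes the ceiling division by max n target, given enough fuel
theorem pvLoopA_eq (t m : Int) (hm : 0 ≤ m) :
    ∀ (fuel : Nat) (n : Int), 1 ≤ n →
      ((PySem.Int.floordiv t (m + 1) + 1) - n).toNat < fuel →
      pvLoopA t m fuel n =
        (if PySem.Int.mod t (max n (PySem.Int.floordiv t (m + 1) + 1)) = 0
         then PySem.Int.floordiv t (max n (PySem.Int.floordiv t (m + 1) + 1))
         else PySem.Int.floordiv t (max n (PySem.Int.floordiv t (m + 1) + 1)) + 1) := by
  intro fuel
  induction fuel with
  | zero => intro n hn hf; omega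
  | succ f ih =>
    intro n hn hf
    by_cases hb : PySem.Int.floordiv t n > m
    · have hlt : ¬ (PySem.Int.floordiv t (m + 1) + 1 ≤ n) := by
        intro h; exact (pvExit_iff t m n hm hn).2 h hb
      simp only [pvLoopA, if_pos hb]
      rw [ih (n + 1) (by omega) (by omega)]
      have hmx : max n (PySem.Int.floordiv t (m + 1) + 1)
           = max (n + 1) (PySem.Int.floordiv t (m + 1) + 1) := by omega
      rw [hmx]
    · have hge : PySem.Int.floordiv t (m + 1) + 1 ≤ n := (pvExit_iff t m n hm hn).1 hb
      have hmax : max n (PySem.Int.floordiv t (m + 1) + 1) = n := by omega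
      simp only [pvLoopA, if_neg hb, hmax]

-- ceiling division written with floordiv of the negation
theorem pvCeil_eq (t k : Int) (hk : 0 < k) :
    -(PySem.Int.floordiv (-t) k)
      = (if PySem.Int.mod t k = 0 then PySem.Int.floordiv t k else PySem.Int.floordiv t k + 1) := by
  have hfm := PySem.Int.floordiv_mul_add_mod t k
  have hm0 := PySem.Int.mod_nonneg t hk
  have hmk := PySem.Int.mod_lt t hk
  split_ifs with h
  · exact (PySem.Int.neg_floordiv_neg_eq_iff_of_pos hk).2 (by constructor <;> nlinarith)
  · have h1 : 1 ≤ PySem.Int.mod t k := by omega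
    exact (PySem.Int.neg_floordiv_neg_eq_iff_of_pos hk).2 (by constructor <;> nlinarith)

theorem pvDiv_nonneg (t i : Int) (ht : 0 ≤ t) (hi : 0 < i) :
    0 ≤ PySem.Int.floordiv t i :=
  (PySem.Int.le_floordiv_iff_mul_le hi).2 (by nlinarith)

theorem pvDiv_le_self (t i : Int) (ht : 0 ≤ t) (hi : 0 < i) :
    PySem.Int.floordiv t i ≤ t := by
  have h2 : PySem.Int.floordiv t i < t + 1 ↔ t < (t + 1) * i :=
    PySem.Int.floordiv_lt_iff_lt_mul hi
  have h3 : t < (t + 1) * i := by nlinarith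
  omega

-- ===== VERDICT (by name: the statement is the Claim_ definition above) =====
theorem calculate_class_size_spec : Claim_equal_calculate_class_size := by
  intro t m i _ hpre
  unfold Spec_calculate_class_size
  simp only [calculate_class_size, calculate_class_size_alt]
  by_cases h1 : t ≤ m
  · simp [h1]
  · obtain ⟨hi, hm⟩ : 0 < i ∧ 0 ≤ m := hpre.resolve_left h1
    have ht : 1 ≤ t := by omega
    simp only [if_neg h1]
    set s := PySem.Int.floordiv t i with hs
    set r := PySem.Int.mod t i with hr
    by_cases h2 : r = 0
    · simp [h2]
    · simp only [if_neg h2]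
      by_cases h3 : r = s
      · simp [h3]
      · by_cases h4 : r < s
        · simp [h3, h4, le_of_lt h4]
        · have hrs : ¬ (r ≤ s) := by omega
          simp only [if_neg h3, if_neg h4, if_neg hrs]
          have hs0 : 0 ≤ s := pvDiv_nonneg t i (by omega) hi
          have htar : PySem.Int.floordiv t (m + 1) + 1 ≤ t + 1 := by
            have := pvDiv_le_self t (m + 1) (by omega) (by omega)
            omega
          rw [pvLoopA_eq t m hm (t.toNat + 2) (s + 1) (by omega) (by omega)]
          rw [pvCeil_eq t (max (s + 1) (PySem.Int.floordiv t (m + 1) + 1)) (by omega)]
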